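-- pv_equiv track=rewrite | github.com/Theosdoor/list-comp | src/sae/steering.py | _find_argmax_dominance_ranges
-- ===== SOURCE A (Python) =====
-- def _find_argmax_dominance_ranges(scales, argmax_seq, target_val):
--     """
--     Find scale ranges where argmax equals target_val.
--
--     Returns list of (lower, upper) tuples representing contiguous ranges
--     where argmax == target_val.
--     """
--     ranges = []
--     in_range = False
--     range_start = None
--
--     for i, (scale, argmax) in enumerate(zip(scales, argmax_seq)):
--         if argmax == target_val:
--             if not in_range:
--                 in_range = True
--                 range_start = scale
--         else:
--             if in_range:
--                 # Range ended at previous scale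
--                 ranges.append((range_start, scales[i-1]))
--                 in_range = False
--
--     # Handle range extending to end
--     if in_range:
--         ranges.append((range_start, scales[-1]))
--
--     return ranges
-- ===== SOURCE B (Python) =====
-- def _find_argmax_dominance_ranges(scales, argmax_seq, target_val):
--     """Staged boundary computation: build a boolean mask over the zipped
--     region, collect the indices where a run of True starts and where one
--     ends as two separate comprehensions, and pair them up.  No in_range
--     state is carried through any scan."""
--     pairs = list(zip(scales, argmax_seq))
--     n = len(pairs)
--     mask = [a == target_val for _, a in pairs]
--     starts = [i for i in range(n) if mask[i] and (i == 0 or not mask[i - 1])]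
--     ends = [i for i in range(n) if mask[i] and (i == n - 1 or not mask[i + 1])]
--     return [(pairs[s][0], pairs[e][0]) for s, e in zip(starts, ends)]
-- ===== Notes on version B (the rewrite author's own statement) =====
-- stated objective: alternative
-- what changed: Replaces A's single stateful scan (in_range flag, enumerate index, scales[i-1]/scales[-1] arithmetic) by staged passes: build a boolean mask over the zipped region, collect run-start indices and run-end indices as two independent boundary comprehensions, and zip them into (scale, scale) ranges.
-- intended difference: When scales is longer than argmax_seq, argmax_seq is non-empty and its last element equals target_val (and the scale at the end of the zipped region differs from scales[-1]), A ends the final range with scales[-1], a scale beyond the compared region, while B ends it with the last zipped scale, which is the intended upper bound of the range where argmax == target. — e.g. on _find_argmax_dominance_ranges([1, 2, 3], [5], 5): A returns [(1, 3)], B returns [(1, 1)]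
import Mathlib
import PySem

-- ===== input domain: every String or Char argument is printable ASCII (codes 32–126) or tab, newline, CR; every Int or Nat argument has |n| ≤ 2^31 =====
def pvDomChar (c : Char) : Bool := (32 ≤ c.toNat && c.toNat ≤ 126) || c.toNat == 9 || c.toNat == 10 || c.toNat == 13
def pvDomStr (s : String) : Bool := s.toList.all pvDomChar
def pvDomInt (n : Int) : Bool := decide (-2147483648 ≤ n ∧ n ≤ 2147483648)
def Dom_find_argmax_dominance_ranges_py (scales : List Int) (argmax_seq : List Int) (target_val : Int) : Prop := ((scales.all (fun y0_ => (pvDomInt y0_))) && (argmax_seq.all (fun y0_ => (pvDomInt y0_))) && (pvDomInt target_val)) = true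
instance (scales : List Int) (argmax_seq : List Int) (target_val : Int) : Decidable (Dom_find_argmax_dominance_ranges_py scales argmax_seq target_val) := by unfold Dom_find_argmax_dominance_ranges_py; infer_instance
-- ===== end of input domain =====

-- B replaces A's stateful forward scan (in_range flag + index arithmetic) by staged passes:
-- a boolean mask, two boundary-index comprehensions (run starts / run ends), zipped together
-- (objective: alternative, not faster).

-- ===== PORT A =====
-- Loop body of A's forward scan; state = (ranges, in_range, range_start).
-- The `.getD 0` after pyGet? is only on paths Python never reaches
-- (in_range = true implies the enumerate index is ≥ 1 and scales ≠ []).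
def aStep_pv (scales : List Int) (target_val : Int)
    (st : List (Int × Int) × Bool × Option Int) (ip : Int × (Int × Int)) :
    List (Int × Int) × Bool × Option Int :=
  if ip.2.2 = target_val then
    if !st.2.1 then (st.1, true, some ip.2.1) else st
  else
    if st.2.1 then
      (st.1 ++ [(st.2.2.getD 0, (PySem.List.pyGet? scales (ip.1 - 1)).getD 0)], false, st.2.2)
    else st

def find_argmax_dominance_ranges_py (scales : List Int) (argmax_seq : List Int) (target_val : Int) : List (Int × Int) :=
  let st := (PySem.List.enumerate (scales.zip argmax_seq) 0).foldl (aStep_pv scales target_val) ([], false, none)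
  if st.2.1 then st.1 ++ [(st.2.2.getD 0, (PySem.List.pyGet? scales (-1)).getD 0)] else st.1

-- ===== PORT B =====
-- Staged passes over the zipped region: mask, run-start indices, run-end indices, pair them.
def find_argmax_dominance_ranges_py_alt (scales : List Int) (argmax_seq : List Int) (target_val : Int) : List (Int × Int) :=
  let pairs := scales.zip argmax_seq
  let n := pairs.length
  let mask := pairs.map (fun p => p.2 == target_val)
  let starts := (List.range n).filter (fun i => mask.getD i false && (i == 0 || !(mask.getD (i - 1) false)))
  let ends := (List.range n).filter (fun i => mask.getD i false && (i == n - 1 || !(mask.getD (i + 1) false)))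
  (starts.zip ends).map (fun se => ((pairs.getD se.1 (0, 0)).1, (pairs.getD se.2 (0, 0)).1))

-- ===== PRECONDITION & SPEC =====
-- When scales is longer than argmax_seq, argmax_seq is non-empty, its last element equals
-- target_val and the last zipped scale differs from scales[-1], A ends the final range with
-- scales[-1] — a scale beyond the zipped region actually compared — while B ends it with the
-- last zipped scale, which is the intended upper bound of the range where argmax == target.
def D_find_argmax_dominance_ranges_py (scales : List Int) (argmax_seq : List Int) (target_val : Int) : Prop :=
  argmax_seq.length < scales.length ∧ argmax_seq.getLast? = some target_val ∧
    scales[argmax_seq.length - 1]? ≠ scales.getLast?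
instance (scales : List Int) (argmax_seq : List Int) (target_val : Int) : Decidable (D_find_argmax_dominance_ranges_py scales argmax_seq target_val) := by unfold D_find_argmax_dominance_ranges_py; infer_instance

def Spec_find_argmax_dominance_ranges_py (scales : List Int) (argmax_seq : List Int) (target_val : Int) (out : List (Int × Int)) : Prop := ¬ D_find_argmax_dominance_ranges_py scales argmax_seq target_val → out = find_argmax_dominance_ranges_py_alt scales argmax_seq target_val
instance (scales : List Int) (argmax_seq : List Int) (target_val : Int) (out : List (Int × Int)) : Decidable (Spec_find_argmax_dominance_ranges_py scales argmax_seq target_val out) := by unfold Spec_find_argmax_dominance_ranges_py; infer_instance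

def pvDiffWitness_find_argmax_dominance_ranges_py : List Int × List Int × Int := ([1, 2, 3], [5], 5)
def pvDiffWitnessOut_find_argmax_dominance_ranges_py : (List (Int × Int)) × (List (Int × Int)) := ([(1, 3)], [(1, 1)])

-- ===== CLAIM (what is proved, stated in full; the proofs are below) =====
def Claim_unchanged_find_argmax_dominance_ranges_py : Prop := ∀ (scales : List Int) (argmax_seq : List Int) (target_val : Int), Dom_find_argmax_dominance_ranges_py scales argmax_seq target_val → Spec_find_argmax_dominance_ranges_py scales argmax_seq target_val (find_argmax_dominance_ranges_py scales argmax_seq target_val)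
def Claim_changed_find_argmax_dominance_ranges_py : Prop := Dom_find_argmax_dominance_ranges_py (pvDiffWitness_find_argmax_dominance_ranges_py.1) (pvDiffWitness_find_argmax_dominance_ranges_py.2.1) (pvDiffWitness_find_argmax_dominance_ranges_py.2.2) ∧ D_find_argmax_dominance_ranges_py (pvDiffWitness_find_argmax_dominance_ranges_py.1) (pvDiffWitness_find_argmax_dominance_ranges_py.2.1) (pvDiffWitness_find_argmax_dominance_ranges_py.2.2) ∧ find_argmax_dominance_ranges_py (pvDiffWitness_find_argmax_dominance_ranges_py.1) (pvDiffWitness_find_argmax_dominance_ranges_py.2.1) (pvDiffWitness_find_argmax_dominance_ranges_py.2.2) = pvDiffWitnessOut_find_argmax_dominance_ranges_py.1 ∧ find_argmax_dominance_ranges_py_alt (pvDiffWitness_find_argmax_dominance_ranges_py.1) (pvDiffWitness_find_argmax_dominance_ranges_py.2.1) (pvDiffWitness_find_argmax_dominance_ranges_py.2.2) = pvDiffWitnessOut_find_argmax_dominance_ranges_py.2 ∧ pvDiffWitnessOut_find_argmax_dominance_ranges_py.1 ≠ pvDiffWitnessOut_find_argmax_dominance_ranges_py.2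
def Claim_exact_find_argmax_dominance_ranges_py : Prop := ∀ (scales : List Int) (argmax_seq : List Int) (target_val : Int), Dom_find_argmax_dominance_ranges_py scales argmax_seq target_val → D_find_argmax_dominance_ranges_py scales argmax_seq target_val → find_argmax_dominance_ranges_py scales argmax_seq target_val ≠ find_argmax_dominance_ranges_py_alt scales argmax_seq target_val

-- ===== LEMMAS AND PROOFS =====

-- Reference functions: a contiguous-run recursion over the zipped pairs, written
-- left-to-right.  runsRef/runRef close a run that reaches the end of the list with the
-- previous pair's scale (B's behaviour); runsA/runA close it with the fixed value `fin`
-- (A uses fin = scales[-1]).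
mutual
def runsRef_pv (t : Int) : List (Int × Int) → List (Int × Int)
  | [] => []
  | p :: l => if p.2 = t then runRef_pv t p.1 p.1 l else runsRef_pv t l
def runRef_pv (t start prev : Int) : List (Int × Int) → List (Int × Int)
  | [] => [(start, prev)]
  | p :: l => if p.2 = t then runRef_pv t start p.1 l else (start, prev) :: runsRef_pv t l
end

mutual
def runsA_pv (t fin : Int) : List (Int × Int) → List (Int × Int)
  | [] => []
  | p :: l => if p.2 = t then runA_pv t fin p.1 p.1 l else runsA_pv t fin l
def runA_pv (t fin start prev : Int) : List (Int × Int) → List (Int × Int)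
  | [] => [(start, fin)]
  | p :: l => if p.2 = t then runA_pv t fin start p.1 l else (start, prev) :: runsA_pv t fin l
end

-- ---- B-side analysis: boundary indices as structural recursions ----
def maskOf_pv (t : Int) (l : List (Int × Int)) : List Bool := l.map (fun p => p.2 == t)

def startsRec_pv : Bool → List Bool → List Nat
  | _, [] => []
  | prev, b :: m => (if b && !prev then [0] else []) ++ (startsRec_pv b m).map (· + 1)

def endsRec_pv : List Bool → List Nat
  | [] => []
  | b :: m => (if b && !(m.getD 0 false) then [0] else []) ++ (endsRec_pv m).map (· + 1)

def pairW_pv (l : List (Int × Int)) (ss es : List Nat) : List (Int × Int) :=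
  (ss.zip es).map (fun se => ((l.getD se.1 (0, 0)).1, (l.getD se.2 (0, 0)).1))

def tE_pv (m : List Bool) : List Nat :=
  if m.getD 0 false then (endsRec_pv m).tail else endsRec_pv m
def cE_pv (l : List (Int × Int)) (m : List Bool) (prev : Int) : Int :=
  if m.getD 0 false then (l.getD ((endsRec_pv m).headD 0) (0, 0)).1 else prev

lemma pairW_shift_pv (p : Int × Int) (l : List (Int × Int)) (ss es : List Nat) :
    pairW_pv (p :: l) (ss.map (· + 1)) (es.map (· + 1)) = pairW_pv l ss es := by
  induction ss generalizing es with
  | nil => simp [pairW_pv]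
  | cons s ss ih =>
    cases es with
    | nil => simp [pairW_pv]
    | cons e es =>
      have h := ih es
      simp only [List.map_cons, pairW_pv, List.zip_cons_cons] at *
      rw [List.getD_cons_succ, List.getD_cons_succ, h]

lemma mapsucc_pv (l : List Nat) : l.map Nat.succ = l.map (· + 1) :=
  List.map_congr_left (fun _ _ => rfl)

lemma filterStarts_pv : ∀ (m : List Bool) (prev : Bool),
    (List.range m.length).filter
        (fun i => m.getD i false && (if i == 0 then !prev else !(m.getD (i - 1) false)))
      = startsRec_pv prev m := by
  intro m
  induction m with
  | nil => intro prev; simp [startsRec_pv]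
  | cons b m ih =>
    intro prev
    rw [List.length_cons, List.range_succ_eq_map, List.filter_cons]
    rw [List.filter_map]
    have hcong : (List.range m.length).filter
        ((fun i => (b :: m).getD i false && (if i == 0 then !prev else !((b :: m).getD (i - 1) false))) ∘ Nat.succ)
        = (List.range m.length).filter
        (fun i => m.getD i false && (if i == 0 then !b else !(m.getD (i - 1) false))) := by
      apply List.filter_congr
      intro i _
      cases i with
      | zero => simp
      | succ j => simp
    rw [hcong, ih b, mapsucc_pv]
    simp only [startsRec_pv]
    cases hb : (b && !prev) with
    | true => simp [hb]
    | false => simp [hb]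

lemma filterEnds_pv : ∀ (m : List Bool),
    (List.range m.length).filter (fun i => m.getD i false && !(m.getD (i + 1) false))
      = endsRec_pv m := by
  intro m
  induction m with
  | nil => simp [endsRec_pv]
  | cons b m ih =>
    rw [List.length_cons, List.range_succ_eq_map, List.filter_cons]
    rw [List.filter_map]
    have hcong : (List.range m.length).filter
        ((fun i => (b :: m).getD i false && !((b :: m).getD (i + 1) false)) ∘ Nat.succ)
        = (List.range m.length).filter (fun i => m.getD i false && !(m.getD (i + 1) false)) := by
      apply List.filter_congr
      intro i _
      simp
    rw [hcong, ih, mapsucc_pv]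
    simp only [endsRec_pv]
    cases hb : (b && !(m.getD 0 false)) with
    | true => simp only [List.getD_eq_getElem?_getD] at hb; simp at hb; simp [hb.1, hb.2]
    | false =>
      simp only [List.getD_eq_getElem?_getD] at hb
      simp at hb
      simp
      intro h1
      exact hb h1

lemma getD_len_pv (m : List Bool) : m.getD m.length false = false := by
  simp [List.getD]

lemma endsPred_pv (m : List Bool) :
    (List.range m.length).filter
        (fun i => m.getD i false && (i == m.length - 1 || !(m.getD (i + 1) false)))
      = (List.range m.length).filter (fun i => m.getD i false && !(m.getD (i + 1) false)) := by
  apply List.filter_congr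
  intro i hi
  rw [List.mem_range] at hi
  by_cases h : i = m.length - 1
  · have h1 : i + 1 = m.length := by omega
    have h2 : (i == m.length - 1) = true := by simp [h]
    have h3 : m.getD (i + 1) false = false := by rw [h1]; exact getD_len_pv m
    have h3' : m[i + 1]?.getD false = false := h3
    simp [h2, h3']
  · have : (i == m.length - 1) = false := by simp [h]
    simp [this]

lemma startsPred_pv (m : List Bool) :
    (List.range m.length).filter
        (fun i => m.getD i false && (i == 0 || !(m.getD (i - 1) false)))
      = (List.range m.length).filter
        (fun i => m.getD i false && (if i == 0 then !false else !(m.getD (i - 1) false))) := by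
  apply List.filter_congr
  intro i _
  cases i with
  | zero => simp
  | succ j => simp

lemma endsRec_ne_nil_pv : ∀ (m : List Bool), m.getD 0 false = true → endsRec_pv m ≠ [] := by
  intro m
  induction m with
  | nil => intro h; simp at h
  | cons b m ih =>
    intro h
    rw [List.getD_cons_zero] at h
    subst h
    by_cases h0 : m.getD 0 false = true
    · have hne := ih h0
      simp only [endsRec_pv, h0]
      simpa using hne
    · simp only [Bool.not_eq_true] at h0
      simp only [endsRec_pv, h0]
      simp

lemma startsRec_indep_pv (m : List Bool) (h : m.getD 0 false = false) (p q : Bool) :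
    startsRec_pv p m = startsRec_pv q m := by
  cases m with
  | nil => rfl
  | cons b m =>
    rw [List.getD_cons_zero] at h
    subst h
    simp [startsRec_pv]

lemma pairW_cons_pv (l : List (Int × Int)) (a b : Nat) (ss es : List Nat) :
    pairW_pv l (a :: ss) (b :: es)
      = ((l.getD a (0, 0)).1, (l.getD b (0, 0)).1) :: pairW_pv l ss es := rfl

lemma SE_pv (t : Int) : ∀ l : List (Int × Int),
    runsRef_pv t l = pairW_pv l (startsRec_pv false (maskOf_pv t l)) (endsRec_pv (maskOf_pv t l)) ∧
      ∀ start prev, runRef_pv t start prev l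
        = (start, cE_pv l (maskOf_pv t l) prev)
            :: pairW_pv l (startsRec_pv true (maskOf_pv t l)) (tE_pv (maskOf_pv t l)) := by
  intro l
  induction l with
  | nil =>
    constructor
    · simp [runsRef_pv, maskOf_pv, startsRec_pv, endsRec_pv, pairW_pv]
    · intro start prev
      simp [runRef_pv, maskOf_pv, startsRec_pv, endsRec_pv, pairW_pv, cE_pv, tE_pv]
  | cons p l ih =>
    have hmask : maskOf_pv t (p :: l) = (p.2 == t) :: maskOf_pv t l := rfl
    by_cases hp : p.2 = t
    · -- head matches
      have hb : (p.2 == t) = true := by simp [hp]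
      have hstartsF : startsRec_pv false (maskOf_pv t (p :: l))
          = 0 :: (startsRec_pv true (maskOf_pv t l)).map (· + 1) := by
        rw [hmask]; simp [startsRec_pv, hb]
      have hstartsT : startsRec_pv true (maskOf_pv t (p :: l))
          = (startsRec_pv true (maskOf_pv t l)).map (· + 1) := by
        rw [hmask]; simp [startsRec_pv, hb]
      by_cases h0 : (maskOf_pv t l).getD 0 false = true
      · -- the run continues into l
        cases hE : endsRec_pv (maskOf_pv t l) with
        | nil => exact absurd hE (endsRec_ne_nil_pv _ h0)
        | cons e0 es =>
          have hends : endsRec_pv (maskOf_pv t (p :: l)) = (e0 + 1) :: es.map (· + 1) := by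
            rw [hmask]
            show (if (p.2 == t) && !((maskOf_pv t l).getD 0 false) then [0] else [])
                ++ (endsRec_pv (maskOf_pv t l)).map (· + 1) = _
            rw [hb, h0, hE]
            rfl
          have hc : cE_pv l (maskOf_pv t l) p.1 = (l.getD e0 (0, 0)).1 := by
            rw [cE_pv, if_pos h0, hE]
            rfl
          have ht : tE_pv (maskOf_pv t l) = es := by
            rw [tE_pv, if_pos h0, hE]
            rfl
          have hmask0 : (maskOf_pv t (p :: l)).getD 0 false = true := by
            rw [hmask, List.getD_cons_zero]; exact hb
          constructor
          · rw [show runsRef_pv t (p :: l) = runRef_pv t p.1 p.1 l by simp [runsRef_pv, hp]]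
            rw [(ih.2) p.1 p.1, hstartsF, hends, hc, ht]
            rw [pairW_cons_pv, pairW_shift_pv]
            rw [List.getD_cons_zero, List.getD_cons_succ]
          · intro start prev
            rw [show runRef_pv t start prev (p :: l) = runRef_pv t start p.1 l by
              simp [runRef_pv, hp]]
            rw [(ih.2) start p.1, hstartsT, hc, ht]
            have hc' : cE_pv (p :: l) (maskOf_pv t (p :: l)) prev = (l.getD e0 (0, 0)).1 := by
              rw [cE_pv, if_pos hmask0, hends]
              rw [List.headD_cons, List.getD_cons_succ]
            have ht' : tE_pv (maskOf_pv t (p :: l)) = es.map (· + 1) := by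
              rw [tE_pv, if_pos hmask0, hends]
              rfl
            rw [hc', ht', pairW_shift_pv]
      · -- the run ends at p itself
        simp only [Bool.not_eq_true] at h0
        have hends : endsRec_pv (maskOf_pv t (p :: l))
            = 0 :: (endsRec_pv (maskOf_pv t l)).map (· + 1) := by
          rw [hmask]
          show (if (p.2 == t) && !((maskOf_pv t l).getD 0 false) then [0] else [])
              ++ (endsRec_pv (maskOf_pv t l)).map (· + 1) = _
          rw [hb, h0]
          rfl
        have hsind : startsRec_pv true (maskOf_pv t l) = startsRec_pv false (maskOf_pv t l) :=
          startsRec_indep_pv _ h0 true false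
        have hc : cE_pv l (maskOf_pv t l) p.1 = p.1 := by rw [cE_pv, h0]; rfl
        have ht : tE_pv (maskOf_pv t l) = endsRec_pv (maskOf_pv t l) := by
          rw [tE_pv, h0]; rfl
        have hmask0 : (maskOf_pv t (p :: l)).getD 0 false = true := by
          rw [hmask, List.getD_cons_zero]; exact hb
        constructor
        · rw [show runsRef_pv t (p :: l) = runRef_pv t p.1 p.1 l by simp [runsRef_pv, hp]]
          rw [(ih.2) p.1 p.1, hstartsF, hends, hc, ht]
          rw [pairW_cons_pv, pairW_shift_pv]
          rw [List.getD_cons_zero]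
        · intro start prev
          rw [show runRef_pv t start prev (p :: l) = runRef_pv t start p.1 l by
            simp [runRef_pv, hp]]
          rw [(ih.2) start p.1, hstartsT, hc, ht]
          have hc' : cE_pv (p :: l) (maskOf_pv t (p :: l)) prev = p.1 := by
            rw [cE_pv, if_pos hmask0, hends]
            rw [List.headD_cons, List.getD_cons_zero]
          have ht' : tE_pv (maskOf_pv t (p :: l)) = (endsRec_pv (maskOf_pv t l)).map (· + 1) := by
            rw [tE_pv, if_pos hmask0, hends]
            rfl
          rw [hc', ht', pairW_shift_pv]
    · -- head does not match
      have hb : (p.2 == t) = false := by simp [hp]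
      have hmask0 : (maskOf_pv t (p :: l)).getD 0 false = false := by
        rw [hmask, List.getD_cons_zero]; exact hb
      have hends : endsRec_pv (maskOf_pv t (p :: l))
          = (endsRec_pv (maskOf_pv t l)).map (· + 1) := by
        rw [hmask]
        show (if (p.2 == t) && !((maskOf_pv t l).getD 0 false) then [0] else [])
            ++ (endsRec_pv (maskOf_pv t l)).map (· + 1) = _
        rw [hb]
        rfl
      have hstartsF : startsRec_pv false (maskOf_pv t (p :: l))
          = (startsRec_pv false (maskOf_pv t l)).map (· + 1) := by
        rw [hmask]; simp [startsRec_pv, hb]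
      have hstartsT : startsRec_pv true (maskOf_pv t (p :: l))
          = (startsRec_pv false (maskOf_pv t l)).map (· + 1) := by
        rw [hmask]; simp [startsRec_pv, hb]
      constructor
      · rw [show runsRef_pv t (p :: l) = runsRef_pv t l by simp [runsRef_pv, hp]]
        rw [ih.1, hstartsF, hends, pairW_shift_pv]
      · intro start prev
        rw [show runRef_pv t start prev (p :: l) = (start, prev) :: runsRef_pv t l by
          simp [runRef_pv, hp]]
        have hc' : cE_pv (p :: l) (maskOf_pv t (p :: l)) prev = prev := by
          rw [cE_pv, hmask0]; rfl
        have ht' : tE_pv (maskOf_pv t (p :: l)) = (endsRec_pv (maskOf_pv t l)).map (· + 1) := by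
          rw [tE_pv, hmask0, hends]; rfl
        rw [hc', ht', hstartsT, pairW_shift_pv, ih.1]

lemma alt_eq_runsRef (scales argmax_seq : List Int) (t : Int) :
    find_argmax_dominance_ranges_py_alt scales argmax_seq t = runsRef_pv t (scales.zip argmax_seq) := by
  show pairW_pv (scales.zip argmax_seq)
      (((List.range (scales.zip argmax_seq).length).filter
        (fun i => (maskOf_pv t (scales.zip argmax_seq)).getD i false &&
          (i == 0 || !((maskOf_pv t (scales.zip argmax_seq)).getD (i - 1) false)))))
      (((List.range (scales.zip argmax_seq).length).filter
        (fun i => (maskOf_pv t (scales.zip argmax_seq)).getD i false &&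
          (i == (scales.zip argmax_seq).length - 1 ||
            !((maskOf_pv t (scales.zip argmax_seq)).getD (i + 1) false)))))
    = runsRef_pv t (scales.zip argmax_seq)
  have hlen : (scales.zip argmax_seq).length = (maskOf_pv t (scales.zip argmax_seq)).length := by
    simp [maskOf_pv]
  rw [(SE_pv t (scales.zip argmax_seq)).1]
  rw [hlen, startsPred_pv, filterStarts_pv, endsPred_pv, filterEnds_pv]

-- ---- A-side analysis (forward scan vs runsA) ----
def AF_pv (scales : List Int) (t : Int) (k : Int) (s : List (Int × Int) × Bool × Option Int)
    (l : List (Int × Int)) : List (Int × Int) × Bool × Option Int :=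
  (PySem.List.enumerate l k).foldl (aStep_pv scales t) s
def finA_pv (scales : List Int) : Int := (PySem.List.pyGet? scales (-1)).getD 0
def finishA_pv (scales : List Int) (st : List (Int × Int) × Bool × Option Int) : List (Int × Int) :=
  if st.2.1 then st.1 ++ [(st.2.2.getD 0, finA_pv scales)] else st.1

lemma LA_pv (scales argmax_seq : List Int) (t : Int) :
    ∀ (l pre : List (Int × Int)), scales.zip argmax_seq = pre ++ l →
      (∀ acc rs0, finishA_pv scales (AF_pv scales t pre.length (acc, false, rs0) l)
          = acc ++ runsA_pv t (finA_pv scales) l) ∧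
      (∀ acc start prev, scales[pre.length - 1]? = some prev → pre ≠ [] →
        finishA_pv scales (AF_pv scales t pre.length (acc, true, some start) l)
          = acc ++ runA_pv t (finA_pv scales) start prev l) := by
  intro l
  induction l with
  | nil =>
    intro pre hsplit
    constructor
    · intro acc rs0
      simp [AF_pv, PySem.List.enumerate_nil, finishA_pv, runsA_pv]
    · intro acc start prev hprev hpre
      simp [AF_pv, PySem.List.enumerate_nil, finishA_pv, runA_pv]
  | cons p l ih =>
    intro pre hsplit
    have hsplit' : scales.zip argmax_seq = (pre ++ [p]) ++ l := by
      rw [hsplit]; simp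
    have hscale : scales[pre.length]? = some p.1 := by
      have h1 : (scales.zip argmax_seq)[pre.length]? = some p := by rw [hsplit]; simp
      exact (List.getElem?_zip_eq_some.mp h1).1
    have hcons : ∀ s, AF_pv scales t (pre.length : Int) s (p :: l)
        = AF_pv scales t ((pre ++ [p]).length : Int) (aStep_pv scales t s ((pre.length : Int), p)) l := by
      intro s
      simp [AF_pv, PySem.List.enumerate_cons]
    have ih' := ih (pre ++ [p]) hsplit'
    have hprev' : scales[(pre ++ [p]).length - 1]? = some p.1 := by
      simpa using hscale
    constructor
    · intro acc rs0
      by_cases hp : p.2 = t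
      · rw [hcons]
        have hstep : aStep_pv scales t (acc, false, rs0) ((pre.length : Int), p)
            = (acc, true, some p.1) := by simp [aStep_pv, hp]
        rw [hstep, ih'.2 acc p.1 p.1 hprev' (by simp)]
        simp [runsA_pv, hp]
      · rw [hcons]
        have hstep : aStep_pv scales t (acc, false, rs0) ((pre.length : Int), p)
            = (acc, false, rs0) := by simp [aStep_pv, hp]
        rw [hstep, (ih'.1) acc rs0]
        simp [runsA_pv, hp]
    · intro acc start prev hprev hpre
      by_cases hp : p.2 = t
      · rw [hcons]
        have hstep : aStep_pv scales t (acc, true, some start) ((pre.length : Int), p)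
            = (acc, true, some start) := by simp [aStep_pv, hp]
        rw [hstep, ih'.2 acc start p.1 hprev' (by simp)]
        simp [runA_pv, hp]
      · have hlen1 : 1 ≤ pre.length := by
          cases pre with
          | nil => exact absurd rfl hpre
          | cons a l2 => simp
        have hget : (PySem.List.pyGet? scales ((pre.length : Int) - 1)).getD 0 = prev := by
          rw [PySem.List.pyGet?_of_nonneg scales (by omega)]
          have h2 : ((pre.length : Int) - 1).toNat = pre.length - 1 := by omega
          rw [h2, hprev]
          rfl
        rw [hcons]
        have hstep : aStep_pv scales t (acc, true, some start) ((pre.length : Int), p)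
            = (acc ++ [(start, prev)], false, some start) := by
          simp [aStep_pv, hp, hget]
        rw [hstep, (ih'.1) (acc ++ [(start, prev)]) (some start)]
        simp [runA_pv, hp]

lemma a_eq_runsA (scales argmax_seq : List Int) (t : Int) :
    find_argmax_dominance_ranges_py scales argmax_seq t
      = runsA_pv t (finA_pv scales) (scales.zip argmax_seq) := by
  have h := (LA_pv scales argmax_seq t (scales.zip argmax_seq) [] (by simp)).1 [] none
  simpa [AF_pv, finishA_pv, finA_pv, find_argmax_dominance_ranges_py] using h

lemma link_pv (t fin : Int) (l : List (Int × Int)) :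
    ((∀ q, l.getLast? = some q → q.2 = t → q.1 = fin) → runsA_pv t fin l = runsRef_pv t l) ∧
      (∀ start prev, (l = [] → prev = fin) → (∀ q, l.getLast? = some q → q.2 = t → q.1 = fin) →
        runA_pv t fin start prev l = runRef_pv t start prev l) := by
  induction l with
  | nil =>
    refine ⟨fun _ => rfl, fun start prev h1 _ => ?_⟩
    simp [runA_pv, runRef_pv, h1 rfl]
  | cons p l ih =>
    have htrans : (∀ q, (p :: l).getLast? = some q → q.2 = t → q.1 = fin) →
        ∀ q, l.getLast? = some q → q.2 = t → q.1 = fin := by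
      intro h q hq
      cases l with
      | nil => simp at hq
      | cons b l2 => exact h q (by rw [List.getLast?_cons_cons]; exact hq)
    have hsing : (∀ q, (p :: l).getLast? = some q → q.2 = t → q.1 = fin) →
        l = [] → p.2 = t → p.1 = fin := by
      intro h hl hp
      subst hl
      exact h p (by simp) hp
    constructor
    · intro h
      by_cases hp : p.2 = t
      · simp only [runsA_pv, runsRef_pv, hp, if_pos]
        exact ih.2 p.1 p.1 (fun hl => hsing h hl hp) (htrans h)
      · simp only [runsA_pv, runsRef_pv, hp, ite_false]
        exact ih.1 (htrans h)
    · intro start prev h1 h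
      by_cases hp : p.2 = t
      · simp only [runA_pv, runRef_pv, hp, if_pos]
        exact ih.2 start p.1 (fun hl => hsing h hl hp) (htrans h)
      · simp only [runA_pv, runRef_pv, hp, ite_false]
        rw [ih.1 (htrans h)]

lemma lastD_map_fst_pv (l : List (Int × Int)) (q : Int × Int) (h : l.getLast? = some q) (x : Int) :
    (l.map Prod.fst).getLastD x = q.1 := by
  rw [List.getLastD_eq_getLast?, List.getLast?_map, h]
  rfl

lemma getLast?_cons_ne_nil_pv {α : Type} (x : α) (ys : List α) (h : ys ≠ []) :
    (x :: ys).getLast? = ys.getLast? := by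
  cases ys with
  | nil => exact absurd rfl h
  | cons b l => rw [List.getLast?_cons_cons]

lemma lastlem_pv (t fin : Int) (l : List (Int × Int)) :
    (∀ q, l.getLast? = some q → q.2 = t →
        ∃ s, (runsA_pv t fin l).getLast? = some (s, fin) ∧
          (runsRef_pv t l).getLast? = some (s, q.1)) ∧
      (∀ start prev, (∀ q, l.getLast? = some q → q.2 = t) →
        ∃ s, (runA_pv t fin start prev l).getLast? = some (s, fin) ∧
          (runRef_pv t start prev l).getLast? = some (s, ((l.map Prod.fst).getLastD prev))) := by
  induction l with
  | nil =>
    constructor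
    · intro q hq; simp at hq
    · intro start prev _
      exact ⟨start, by simp [runA_pv, runRef_pv]⟩
  | cons p l ih =>
    constructor
    · intro q hq hqt
      by_cases hp : p.2 = t
      · simp only [runsA_pv, runsRef_pv, hp, if_pos]
        have hyp : ∀ q', l.getLast? = some q' → q'.2 = t := by
          intro q' hq'
          have hl : l ≠ [] := by intro hl; subst hl; simp at hq'
          rw [← getLast?_cons_ne_nil_pv p l hl] at hq'
          rw [hq] at hq'
          cases hq'
          exact hqt
        obtain ⟨s, h1, h2⟩ := ih.2 p.1 p.1 hyp
        refine ⟨s, h1, ?_⟩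
        rw [h2]
        by_cases hl : l = []
        · subst hl
          simp at hq
          subst hq
          rfl
        · have hql : l.getLast? = some q := by
            rw [← getLast?_cons_ne_nil_pv p l hl]; exact hq
          rw [lastD_map_fst_pv l q hql]
      · have hl : l ≠ [] := by
          intro hl; subst hl
          simp at hq; subst hq; exact hp hqt
        have hql : l.getLast? = some q := by
          rw [← getLast?_cons_ne_nil_pv p l hl]; exact hq
        simp only [runsA_pv, runsRef_pv, hp, ite_false]
        exact ih.1 q hql hqt
    · intro start prev hyp
      by_cases hp : p.2 = t
      · simp only [runA_pv, runRef_pv, hp, if_pos]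
        have hyp' : ∀ q', l.getLast? = some q' → q'.2 = t := by
          intro q' hq'
          have hl : l ≠ [] := by intro hl; subst hl; simp at hq'
          exact hyp q' (by rw [getLast?_cons_ne_nil_pv p l hl]; exact hq')
        obtain ⟨s, h1, h2⟩ := ih.2 start p.1 hyp'
        refine ⟨s, h1, ?_⟩
        rw [h2]
        rw [List.map_cons, List.getLastD_cons]
      · have hl : l ≠ [] := by
          intro hl; subst hl
          exact hp (hyp p (by simp))
        obtain ⟨q, hql⟩ : ∃ q, l.getLast? = some q := by
          cases hq : l.getLast? with
          | none => exact absurd (List.getLast?_eq_none_iff.mp hq) hl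
          | some q => exact ⟨q, rfl⟩
        have hqt : q.2 = t := hyp q (by rw [getLast?_cons_ne_nil_pv p l hl]; exact hql)
        obtain ⟨s, h1, h2⟩ := ih.1 q hql hqt
        have hAne : runsA_pv t fin l ≠ [] := by
          intro h0; rw [h0] at h1; simp at h1
        have hRne : runsRef_pv t l ≠ [] := by
          intro h0; rw [h0] at h2; simp at h2
        simp only [runA_pv, runRef_pv, hp, ite_false]
        refine ⟨s, ?_, ?_⟩
        · rw [getLast?_cons_ne_nil_pv _ _ hAne]; exact h1
        · rw [getLast?_cons_ne_nil_pv _ _ hRne, h2]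
          have : ((p :: l).map Prod.fst).getLastD prev = q.1 := by
            apply lastD_map_fst_pv
            rw [getLast?_cons_ne_nil_pv p l hl]; exact hql
          rw [this]

-- ===== VERDICT (by name: the statement is the Claim_ definition above) =====
theorem find_argmax_dominance_ranges_py_spec : Claim_unchanged_find_argmax_dominance_ranges_py := by
  intro scales argmax_seq t _hdom
  unfold Spec_find_argmax_dominance_ranges_py
  intro hD
  rw [a_eq_runsA, alt_eq_runsRef]
  apply (link_pv t (finA_pv scales) (scales.zip argmax_seq)).1
  intro q hq hqt
  have hps := hq
  rw [List.getLast?_eq_getElem?] at hps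
  have hne : (scales.zip argmax_seq) ≠ [] := by
    intro h0; rw [h0] at hq; simp at hq
  have hnpos : 1 ≤ (scales.zip argmax_seq).length := List.length_pos_of_ne_nil hne
  have hlenz : (scales.zip argmax_seq).length = min scales.length argmax_seq.length :=
    List.length_zip
  obtain ⟨hs, ha⟩ := List.getElem?_zip_eq_some.mp hps
  have hscne : scales ≠ [] := by
    intro h0; subst h0; simp at hs
  obtain ⟨v, hv⟩ : ∃ v, scales.getLast? = some v := by
    cases h0 : scales.getLast? with
    | none => exact absurd (List.getLast?_eq_none_iff.mp h0) hscne
    | some v => exact ⟨v, rfl⟩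
  have hfin : finA_pv scales = v := by
    rw [finA_pv, PySem.List.pyGet?_neg_one, hv]; rfl
  have hvget : scales[scales.length - 1]? = some v := by
    rw [← List.getLast?_eq_getElem?]; exact hv
  rcases lt_or_ge argmax_seq.length scales.length with hlt | hge
  · have hnn : (scales.zip argmax_seq).length = argmax_seq.length := by omega
    have hamlast : argmax_seq.getLast? = some t := by
      rw [List.getLast?_eq_getElem?, ← hnn, ha, hqt]
    have h3 : scales[argmax_seq.length - 1]? = scales.getLast? := by
      by_contra hc
      exact hD ⟨hlt, hamlast, hc⟩
    rw [hnn] at hs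
    rw [hs, hv] at h3
    rw [hfin]
    exact Option.some.inj h3
  · have hnn : (scales.zip argmax_seq).length = scales.length := by omega
    rw [hnn, hvget] at hs
    rw [hfin]
    exact (Option.some.inj hs).symm

theorem find_argmax_dominance_ranges_py_changed : Claim_changed_find_argmax_dominance_ranges_py := by
  unfold Claim_changed_find_argmax_dominance_ranges_py; decide

theorem find_argmax_dominance_ranges_py_tight : Claim_exact_find_argmax_dominance_ranges_py := by
  intro scales argmax_seq t _hdom hD
  obtain ⟨hlt, hamlast, hnev⟩ := hD
  have hampos : 1 ≤ argmax_seq.length := by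
    have : argmax_seq ≠ [] := by
      intro h0; subst h0; simp at hamlast
    exact List.length_pos_of_ne_nil this
  have hat : argmax_seq[argmax_seq.length - 1]? = some t := by
    rw [← List.getLast?_eq_getElem?]; exact hamlast
  have hidx : argmax_seq.length - 1 < scales.length := by omega
  obtain ⟨sv, hsv⟩ : ∃ sv, scales[argmax_seq.length - 1]? = some sv :=
    ⟨scales[argmax_seq.length - 1], List.getElem?_eq_getElem hidx⟩
  have hscne : scales ≠ [] := by
    intro h0; subst h0; simp at hidx
  obtain ⟨v, hv⟩ : ∃ v, scales.getLast? = some v := by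
    cases h0 : scales.getLast? with
    | none => exact absurd (List.getLast?_eq_none_iff.mp h0) hscne
    | some v => exact ⟨v, rfl⟩
  have hsvv : sv ≠ v := by
    intro h0; rw [h0, ← hv] at hsv; exact hnev hsv
  have hfin : finA_pv scales = v := by
    rw [finA_pv, PySem.List.pyGet?_neg_one, hv]; rfl
  have hlenz : (scales.zip argmax_seq).length = argmax_seq.length := by
    rw [List.length_zip]; omega
  have hqlast : (scales.zip argmax_seq).getLast? = some (sv, t) := by
    rw [List.getLast?_eq_getElem?, hlenz]
    exact List.getElem?_zip_eq_some.mpr ⟨hsv, hat⟩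
  obtain ⟨s, h1, h2⟩ :=
    (lastlem_pv t (finA_pv scales) (scales.zip argmax_seq)).1 (sv, t) hqlast rfl
  rw [a_eq_runsA, alt_eq_runsRef]
  intro heq
  rw [heq, h2] at h1
  have := Option.some.inj h1
  have h4 : sv = finA_pv scales := congrArg Prod.snd this
  rw [hfin] at h4
  exact hsvv h4
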